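-- pv_equiv track=rewrite | github.com/Morphenr/Azul | helper_functions/helper_functions.py | calculate_floor_penalty
-- ===== SOURCE A (Python) =====
-- def calculate_floor_penalty(floor_line):
--     """
--     Calculate the total penalty for tiles left on the floor line.
--     Uses a predefined penalty structure where the first few tiles incur less penalty.
--     """
--     penalties = [-1, -1, -2, -2, -2, -3, -3]  # Standard Azul floor penalties
--     total_penalty = 0
--
--     for idx, tile in enumerate(floor_line):
--         if idx < len(penalties):
--             total_penalty += penalties[idx]
--         else:
--             total_penalty += penalties[-1]  # Apply max penalty for additional tiles
--
--     return total_penalty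
-- ===== SOURCE B (Python) =====
-- def calculate_floor_penalty(floor_line):
--     n = len(floor_line)
--     prefix = [0, -1, -2, -4, -6, -8, -11, -14]
--     return prefix[n] if n < 8 else -14 - 3 * (n - 7)
-- ===== Notes on version B (the rewrite author's own statement) =====
-- stated objective: faster
-- what changed: Replaces the per-tile loop with an O(1) closed form: a precomputed prefix-sum table for lengths 0..7 plus -3 per tile beyond the seventh.
import Mathlib
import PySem

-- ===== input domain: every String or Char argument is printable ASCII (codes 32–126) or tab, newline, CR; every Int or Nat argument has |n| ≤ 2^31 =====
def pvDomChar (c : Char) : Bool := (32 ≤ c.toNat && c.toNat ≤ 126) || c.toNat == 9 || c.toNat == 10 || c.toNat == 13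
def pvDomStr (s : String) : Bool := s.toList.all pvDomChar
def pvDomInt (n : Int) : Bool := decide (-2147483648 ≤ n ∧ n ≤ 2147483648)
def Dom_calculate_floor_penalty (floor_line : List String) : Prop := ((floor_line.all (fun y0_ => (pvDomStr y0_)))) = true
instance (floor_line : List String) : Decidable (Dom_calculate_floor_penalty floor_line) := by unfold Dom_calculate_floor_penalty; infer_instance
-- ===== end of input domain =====

-- B replaces A's per-tile loop with an O(1) closed form (prefix-sum table + overflow formula).

-- ===== PORT A =====
def calculate_floor_penalty (floor_line : List String) : Int :=
  let penalties : List Int := [-1, -1, -2, -2, -2, -3, -3]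
  (PySem.List.enumerate floor_line).foldl
    (fun total_penalty p =>
      if p.1 < (penalties.length : Int) then
        total_penalty + PySem.List.pyGetD penalties p.1 0
      else
        total_penalty + PySem.List.pyGetD penalties (-1) 0)
    0

-- ===== PORT B =====
def calculate_floor_penalty_alt (floor_line : List String) : Int :=
  let n : Int := floor_line.length
  let table : List Int := [0, -1, -2, -4, -6, -8, -11, -14]
  if n < 8 then PySem.List.pyGetD table n 0 else -14 - 3 * (n - 7)

-- ===== PRECONDITION & SPEC =====
def Spec_calculate_floor_penalty (floor_line : List String) (out : Int) : Prop := out = calculate_floor_penalty_alt floor_line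
instance (floor_line : List String) (out : Int) : Decidable (Spec_calculate_floor_penalty floor_line out) := by unfold Spec_calculate_floor_penalty; infer_instance

-- ===== CLAIM (what is proved, stated in full; the proofs are below) =====
def Claim_equal_calculate_floor_penalty : Prop := ∀ (floor_line : List String), Dom_calculate_floor_penalty floor_line → Spec_calculate_floor_penalty floor_line (calculate_floor_penalty floor_line)

-- ===== LEMMAS AND PROOFS =====

-- penalty added for the tile at index i (A's branch, as a function of the index)
def pvPen (i : Nat) : Int :=
  if (i : Int) < 7 then PySem.List.pyGetD [-1, -1, -2, -2, -2, -3, -3] (i : Int) 0 else -3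

-- closed form of B as a function of the length
def pvF (n : Nat) : Int :=
  if (n : Int) < 8 then PySem.List.pyGetD [0, -1, -2, -4, -6, -8, -11, -14] (n : Int) 0
  else -14 - 3 * ((n : Int) - 7)

theorem pvA_append (l : List String) (x : String) :
    calculate_floor_penalty (l ++ [x]) = calculate_floor_penalty l + pvPen l.length := by
  unfold calculate_floor_penalty pvPen
  simp [PySem.List.enumerate_append, List.foldl_append, PySem.List.enumerate_cons]
  have h3 : PySem.List.pyGetD ([-1, -1, -2, -2, -2, -3, -3] : List Int) (-1) 0 = -3 := by decide
  rw [h3]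
  split <;> rfl

theorem pvF_succ (n : Nat) : pvF (n + 1) = pvF n + pvPen n := by
  unfold pvF pvPen
  rcases Nat.lt_or_ge n 8 with h | h
  · interval_cases n <;> decide
  · have h7 : ¬ ((n : Int) < 7) := by omega
    have h8 : ¬ ((n : Int) < 8) := by omega
    simp only [Nat.cast_add, Nat.cast_one]
    have h8' : ¬ ((n : Int) + 1 < 8) := by omega
    rw [if_neg h8', if_neg h8, if_neg h7]
    ring

theorem pvB_eq_F (l : List String) : calculate_floor_penalty_alt l = pvF l.length := by
  rfl

theorem pvA_eq_F (l : List String) : calculate_floor_penalty l = pvF l.length := by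
  induction l using List.reverseRecOn with
  | nil => decide
  | append_singleton l x ih =>
      rw [pvA_append, ih, List.length_append, List.length_singleton, pvF_succ]

-- ===== VERDICT (by name: the statement is the Claim_ definition above) =====
theorem calculate_floor_penalty_spec : Claim_equal_calculate_floor_penalty := by
  intro l _
  unfold Spec_calculate_floor_penalty
  rw [pvA_eq_F, pvB_eq_F]
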